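-- pv_equiv track=rewrite | github.com/The-Violinist/HackerRank | beautiful_days.py | beautifulDays
-- ===== SOURCE A (Python) =====
-- def beautifulDays(i, j, k):
--     total = 0
--     for num in range(i,j+1):                    # Create a list of the digits in each number in the range
--         li = [x for x in str(num)]              # Convert the integers to strings in order to join them
--         li.reverse()                            # Reverse the order of the list
--         rev_num = int(''.join(li))              # Join all items from the reversed list and convert the joined string to an integer
--         if (num - rev_num) % k == 0:            # If the result of the number minus its reverse is divisible by k, increment the total by 1
--             total += 1
--     return total
-- ===== SOURCE B (Python) =====
-- def beautifulDays(i, j, k):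
--     total = 0
--     for num in range(i, j + 1):
--         rev = 0
--         n = num
--         while n > 0:                 # arithmetic digit reversal instead of str/join
--             rev = rev * 10 + n % 10
--             n //= 10
--         if (num - rev) % k == 0:
--             total += 1
--     return total
-- ===== Notes on version B (the rewrite author's own statement) =====
-- stated objective: alternative
-- what changed: Replaces the string-based reversal (str -> char list -> reverse -> join -> int) by pure arithmetic digit reversal with an integer accumulator (rev = rev*10 + n%10; n //= 10); the outer counting loop is kept.
import Mathlib
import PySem

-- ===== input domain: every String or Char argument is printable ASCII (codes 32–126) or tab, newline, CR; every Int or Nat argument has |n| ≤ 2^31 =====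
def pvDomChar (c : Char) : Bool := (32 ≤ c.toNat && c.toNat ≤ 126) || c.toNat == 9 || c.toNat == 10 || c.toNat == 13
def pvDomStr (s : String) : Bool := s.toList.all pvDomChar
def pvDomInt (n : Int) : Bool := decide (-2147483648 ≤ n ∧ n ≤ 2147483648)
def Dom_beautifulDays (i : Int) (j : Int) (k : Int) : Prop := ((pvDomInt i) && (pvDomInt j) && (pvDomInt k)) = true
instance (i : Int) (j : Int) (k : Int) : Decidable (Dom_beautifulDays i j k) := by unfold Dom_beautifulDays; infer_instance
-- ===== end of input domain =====

-- B replaces A's string-based digit reversal (str / list reverse / join / int) by arithmetic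
-- digit reversal with an integer accumulator; objective: alternative (same loop count, no string traffic).

-- ===== PORT A =====
-- literal transliteration of A: for num in range(i, j+1): reverse the chars of str(num),
-- parse with int(), test (num - rev_num) % k == 0.  The `none` branch of int() is where
-- Python raises ValueError (num < 0); those inputs are excluded by Pre_.
def beautifulDays (i : Int) (j : Int) (k : Int) : Int :=
  (PySem.List.pyRange i (j + 1)).foldl (fun total num =>
    let li := (PySem.Int.toStr num).toList
    let li := li.reverse
    match PySem.Int.ofStr? (String.ofList li) with
    | some rev_num => if PySem.Int.mod (num - rev_num) k = 0 then total + 1 else total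
    | none => total) 0

-- ===== PORT B =====
-- Source B's while loop: while n > 0: rev = rev*10 + n%10; n //= 10
def revLoop (n : Int) (rev : Int) : Int :=
  if 0 < n then revLoop (PySem.Int.floordiv n 10) (rev * 10 + PySem.Int.mod n 10) else rev
termination_by n.toNat
decreasing_by
  rw [PySem.Int.floordiv_eq_ediv_of_pos (by norm_num : (0:Int) < 10)]
  omega

def beautifulDays_alt (i : Int) (j : Int) (k : Int) : Int :=
  (PySem.List.pyRange i (j + 1)).foldl (fun total num =>
    let rev := revLoop num 0
    if PySem.Int.mod (num - rev) k = 0 then total + 1 else total) 0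

-- ===== PRECONDITION & SPEC =====
-- Pre_ excludes exactly the inputs where Python A raises: when the range is nonempty (i ≤ j),
-- a negative start makes int(''.join(reversed(str(num)))) raise ValueError, and k = 0 makes
-- `% k` raise ZeroDivisionError.  On an empty range A returns 0 for any i, k.
def Pre_beautifulDays (i : Int) (j : Int) (k : Int) : Prop := i ≤ j → (0 ≤ i ∧ k ≠ 0)
instance (i : Int) (j : Int) (k : Int) : Decidable (Pre_beautifulDays i j k) := by
  unfold Pre_beautifulDays; infer_instance

def pvWitness_beautifulDays : Int × Int × Int := (10, 30, 3)

def Spec_beautifulDays (i : Int) (j : Int) (k : Int) (out : Int) : Prop := out = beautifulDays_alt i j k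
instance (i : Int) (j : Int) (k : Int) (out : Int) : Decidable (Spec_beautifulDays i j k out) := by
  unfold Spec_beautifulDays; infer_instance

-- ===== CLAIM (what is proved, stated in full; the proofs are below) =====
def Claim_equal_beautifulDays : Prop := ∀ (i : Int) (j : Int) (k : Int), Dom_beautifulDays i j k → Pre_beautifulDays i j k → Spec_beautifulDays i j k (beautifulDays i j k)

-- ===== LEMMAS AND PROOFS =====

-- decimal-digit step, phrased exactly as PySem's internal parser steps (acc*10 + (c - '0'))
def digVal (a : Nat) (c : Char) : Nat := a * 10 + (c.toNat - '0'.toNat)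

-- transparent mirror of PySem's internal digit-parsing loop, on digit-only strings
def myGo : List Char → Bool → Nat → Option Nat
  | [], b, a => if b then some a else none
  | c :: rest, _, a => if c.isDigit then myGo rest true (a * 10 + (c.toNat - '0'.toNat)) else none

-- arithmetic digit reversal on Nat
def revNat (m : Nat) (a : Nat) : Nat :=
  if 0 < m then revNat (m / 10) (a * 10 + m % 10) else a

theorem digit_not_space (c : Char) (h : c.isDigit = true) : PySem.Int.isIntSpace c = false := by
  simp only [PySem.Int.isIntSpace, Bool.or_eq_false_iff, decide_eq_false_iff_not]
  refine ⟨⟨⟨⟨⟨?_, ?_⟩, ?_⟩, ?_⟩, ?_⟩, ?_⟩ <;> rintro rfl <;> exact absurd h (by decide)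

theorem dropWhile_digits (L : List Char) (h : ∀ c ∈ L, c.isDigit = true) :
    L.dropWhile PySem.Int.isIntSpace = L := by
  cases L with
  | nil => rfl
  | cons c cs =>
      simp [List.dropWhile, digit_not_space c (h c (by simp))]

theorem ofChars?_digits_go (L : List Char) (h : ∀ c ∈ L, c.isDigit = true) (hne : L ≠ []) :
    PySem.Int.ofChars? L = (myGo L false 0).map (fun a : Nat => (a : Int)) := by
  delta PySem.Int.ofChars?
  rw [dropWhile_digits L h]
  rw [dropWhile_digits _ (fun c hc => h c (List.mem_reverse.1 hc))]
  rw [List.reverse_reverse]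
  obtain ⟨c, cs, rfl⟩ : ∃ c cs, L = c :: cs := by
    cases L with | nil => exact absurd rfl hne | cons c cs => exact ⟨c, cs, rfl⟩
  conv_lhs => whnf
  split
  next ds heq =>
    exfalso
    have : '-'.isDigit = true := h '-' (by rw [heq]; simp)
    exact absurd this (by decide)
  next ds heq =>
    exfalso
    have : '+'.isDigit = true := h '+' (by rw [heq]; simp)
    exact absurd this (by decide)
  next e1 e2 =>
    have hmap : ∀ (x : Option Nat), Option.map (fun n : Int => n) (do let a ← x; pure ((a : Nat) : Int)) = Option.map (fun a : Nat => (a : Int)) x := by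
      intro x; cases x <;> rfl
    rw [hmap]
    congr 1
    conv_lhs => whnf
    have hc : c.isDigit = true := h c (by simp)
    rw [myGo, if_pos hc]
    cases hD : instDecidableEqBool c.isDigit true with
    | isFalse hf => exact absurd hc hf
    | isTrue ht =>
      conv_lhs => whnf
      have hcs : ∀ x ∈ cs, x.isDigit = true := fun x hx => h x (List.mem_cons_of_mem _ hx)
      clear hD ht hc hmap hne h e1 e2
      revert hcs
      generalize 0 * 10 + (c.toNat - '0'.toNat) = a
      clear c
      induction cs generalizing a with
      | nil =>
          intro _
          conv_lhs => whnf
          simp [myGo]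
      | cons d ds IH =>
          intro hcs
          have hd : d.isDigit = true := hcs d (by simp)
          conv_lhs => whnf
          cases hD : instDecidableEqBool d.isDigit true with
          | isFalse hf => exact absurd hd hf
          | isTrue ht =>
            conv_lhs => whnf
            rw [myGo, if_pos hd]
            exact IH _ (fun x hx => hcs x (List.mem_cons_of_mem _ hx))

theorem myGo_true (ds : List Char) : ∀ a : Nat, (∀ c ∈ ds, c.isDigit = true) →
    myGo ds true a = some (ds.foldl digVal a) := by
  induction ds with
  | nil => intro a _; simp [myGo]
  | cons c cs ih =>
      intro a h
      rw [myGo]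
      rw [if_pos (h c (by simp))]
      rw [ih _ (fun x hx => h x (by simp [hx]))]
      simp [List.foldl, digVal]

theorem ofChars?_digits (L : List Char) (h : ∀ c ∈ L, c.isDigit = true) (hne : L ≠ []) :
    PySem.Int.ofChars? L = some ((L.foldl digVal 0 : Nat) : Int) := by
  rw [ofChars?_digits_go L h hne]
  cases L with
  | nil => exact absurd rfl hne
  | cons c cs =>
      rw [myGo, if_pos (h c (by simp)), myGo_true cs _ (fun x hx => h x (by simp [hx]))]
      simp [List.foldl, digVal]

theorem digitChar_digVal (a : Nat) (d : Nat) (hd : d < 10) :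
    digVal a (Nat.digitChar d) = a * 10 + d := by
  interval_cases d <;> simp [digVal, Nat.digitChar]

theorem rev_foldl (m : Nat) : 0 < m → ∀ a : Nat,
    (Nat.toDigits 10 m).reverse.foldl digVal a = revNat m a := by
  induction m using Nat.strong_induction_on with
  | _ m IH =>
    intro hm a
    by_cases h10 : m < 10
    · rw [Nat.toDigits_of_lt_base h10]
      rw [revNat, if_pos hm]
      rw [revNat]
      have h0 : ¬ 0 < m / 10 := by omega
      rw [if_neg h0]
      simp [digitChar_digVal a m h10]
      omega
    · rw [Nat.toDigits_of_base_le (by norm_num) (by omega)]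
      rw [List.reverse_append]
      simp only [List.reverse_cons, List.reverse_nil, List.nil_append, List.cons_append,
        List.foldl_cons]
      rw [digitChar_digVal a (m % 10) (by omega)]
      rw [IH (m / 10) (by omega) (by omega) (a * 10 + m % 10)]
      conv_rhs => rw [revNat]
      rw [if_pos hm]

theorem revLoop_cast (m : Nat) : ∀ a : Nat, revLoop (m : Int) (a : Int) = ((revNat m a : Nat) : Int) := by
  induction m using Nat.strong_induction_on with
  | _ m IH =>
    intro a
    rw [revLoop, revNat]
    by_cases hm : 0 < m
    · have hm' : (0 : Int) < (m : Int) := by exact_mod_cast hm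
      rw [if_pos hm', if_pos hm]
      have h1 : PySem.Int.floordiv (m : Int) 10 = ((m / 10 : Nat) : Int) := by
        rw [PySem.Int.floordiv_eq_ediv_of_pos (by norm_num : (0:Int) < 10)]; omega
      have h2 : PySem.Int.mod (m : Int) 10 = ((m % 10 : Nat) : Int) := by
        rw [PySem.Int.mod_eq_emod_of_pos (by norm_num : (0:Int) < 10)]; omega
      rw [h1, h2]
      have h3 : ((a : Int) * 10 + ((m % 10 : Nat) : Int)) = ((a * 10 + m % 10 : Nat) : Int) := by
        push_cast; ring
      rw [h3]
      exact IH (m / 10) (by omega) (a * 10 + m % 10)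
    · have hm' : ¬ (0 : Int) < (m : Int) := by exact_mod_cast hm
      rw [if_neg hm', if_neg hm]

theorem key_rev (n : Int) (hn : 0 ≤ n) :
    PySem.Int.ofStr? (String.ofList ((PySem.Int.toStr n).toList.reverse)) = some (revLoop n 0) := by
  rw [PySem.Int.toList_toStr, PySem.Int.ofStr?_ofList]
  lift n to Nat using hn with m
  have htc : PySem.Int.toChars (m : Int) = Nat.toDigits 10 m := by
    simp [PySem.Int.toChars]
  rw [htc]
  have hdig : ∀ c ∈ (Nat.toDigits 10 m).reverse, c.isDigit = true := by
    intro c hc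
    exact Nat.isDigit_of_mem_toDigits (by norm_num) (by norm_num) (List.mem_reverse.1 hc)
  have hne : (Nat.toDigits 10 m).reverse ≠ [] := by
    apply List.ne_nil_of_length_pos
    simpa using Nat.length_toDigits_pos (b := 10) (n := m)
  rw [ofChars?_digits _ hdig hne]
  by_cases hm : 0 < m
  · have hc := revLoop_cast m 0
    norm_num at hc
    rw [rev_foldl m hm 0, hc]
  · have : m = 0 := by omega
    subst this
    rw [Nat.toDigits_zero]
    rw [revLoop]
    norm_num [digVal]

-- ===== VERDICT (by name: the statement is the Claim_ definition above) =====
theorem beautifulDays_spec : Claim_equal_beautifulDays := by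
  intro i j k _ hpre
  unfold Spec_beautifulDays beautifulDays beautifulDays_alt
  apply PySem.List.foldl_congr_mem
  intro acc x hx
  obtain ⟨hix, hxj⟩ := PySem.List.mem_pyRange_one.1 hx
  have h0x : 0 ≤ x := by
    have := hpre (by omega)
    omega
  simp only [key_rev x h0x]
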